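-- pv_equiv track=rewrite | github.com/quang-g/buffet_style_investing_agent | phase_1/chunking_with_llm_gpt_localpos_v5_batch_windowed_g.py | _snap_to_whitespace_before
-- ===== SOURCE A (Python) =====
-- def _clamp_int(x: int, lo: int, hi: int) -> int:
--     return max(lo, min(hi, x))
--
-- def _snap_to_whitespace_before(letter_text: str, pos: int, window: int = 800) -> int:
--     n = len(letter_text)
--     pos = _clamp_int(pos, 0, n)
--     left = max(0, pos - window)
--     k = pos
--     while k > left:
--         if letter_text[k - 1].isspace():
--             return k
--         k -= 1
--     return pos
-- ===== SOURCE B (Python) =====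
-- def _snap_to_whitespace_before(letter_text: str, pos: int, window: int = 800) -> int:
--     n = len(letter_text)
--     if pos < 0:
--         pos = 0
--     elif pos > n:
--         pos = n
--     left = max(0, pos - window)
--     last = None
--     for i, ch in enumerate(letter_text[left:pos]):
--         if ch.isspace():
--             last = i
--     return pos if last is None else left + last + 1
-- ===== Notes on version B (the rewrite author's own statement) =====
-- stated objective: alternative
-- what changed: Replaces A's backward early-exit while-loop over string indices with a single forward pass over the sliced window that maintains the index of the last whitespace seen (no early return, accumulator-based).
import Mathlib
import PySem

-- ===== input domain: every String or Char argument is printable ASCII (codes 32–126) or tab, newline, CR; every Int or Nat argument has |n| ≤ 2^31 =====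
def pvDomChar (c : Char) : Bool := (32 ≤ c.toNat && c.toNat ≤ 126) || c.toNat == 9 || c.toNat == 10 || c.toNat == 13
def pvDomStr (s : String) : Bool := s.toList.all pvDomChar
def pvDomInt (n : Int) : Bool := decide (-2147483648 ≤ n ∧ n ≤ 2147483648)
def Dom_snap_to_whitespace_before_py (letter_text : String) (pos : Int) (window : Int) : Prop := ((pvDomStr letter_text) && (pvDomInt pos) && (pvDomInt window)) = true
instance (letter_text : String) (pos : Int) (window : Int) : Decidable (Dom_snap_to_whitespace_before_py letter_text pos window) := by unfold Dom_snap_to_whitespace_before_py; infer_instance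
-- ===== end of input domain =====

-- B replaces A's backward early-exit scan with a forward pass over the window slice
-- that keeps the index of the last whitespace seen (objective: alternative decomposition).

-- ===== PORT A =====
def clamp_int_py (x lo hi : Int) : Int := max lo (min hi x)

-- A's while-loop: 'some k' models the early 'return k', 'none' models falling out of the
-- loop; the loop guard 'k > left' is carried as the remaining iteration count (k - left).toNat
def snapLoopA (cs : List Char) (fuel : Nat) (k : Int) : Option Int :=
  match fuel with
  | 0 => none
  | fuel + 1 =>
      if PySem.Chars.isspace (PySem.List.pyGetD cs (k - 1) 'x') then some k
      else snapLoopA cs fuel (k - 1)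

def snap_to_whitespace_before_py (letter_text : String) (pos : Int) (window : Int) : Int :=
  let n : Int := letter_text.length
  let p := clamp_int_py pos 0 n
  let left := max 0 (p - window)
  (snapLoopA letter_text.toList (p - left).toNat p).getD p

-- ===== PORT B =====
-- the for-loop of Source B: last index of a whitespace char in s, as maintained by the forward fold
def lastWsIdx (s : List Char) : Option Int :=
  (PySem.List.enumerate s 0).foldl
    (fun acc pr => if PySem.Chars.isspace pr.2 then some pr.1 else acc) none

def snap_to_whitespace_before_py_alt (letter_text : String) (pos : Int) (window : Int) : Int :=
  let n : Int := letter_text.length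
  let p := if pos < 0 then 0 else if pos > n then n else pos
  let left := max 0 (p - window)
  match lastWsIdx (PySem.Str.slice letter_text (some left) (some p)).toList with
  | none => p
  | some i => left + i + 1

-- ===== PRECONDITION & SPEC =====
def Spec_snap_to_whitespace_before_py (letter_text : String) (pos : Int) (window : Int) (out : Int) : Prop := out = snap_to_whitespace_before_py_alt letter_text pos window
instance (letter_text : String) (pos : Int) (window : Int) (out : Int) : Decidable (Spec_snap_to_whitespace_before_py letter_text pos window out) := by unfold Spec_snap_to_whitespace_before_py; infer_instance

-- ===== CLAIM (what is proved, stated in full; the proofs are below) =====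
def Claim_equal_snap_to_whitespace_before_py : Prop := ∀ (letter_text : String) (pos : Int) (window : Int), Dom_snap_to_whitespace_before_py letter_text pos window → Spec_snap_to_whitespace_before_py letter_text pos window (snap_to_whitespace_before_py letter_text pos window)

-- ===== LEMMAS AND PROOFS =====

theorem lastWsIdx_append_singleton (s : List Char) (c : Char) :
    lastWsIdx (s ++ [c]) =
      if PySem.Chars.isspace c then some (s.length : Int) else lastWsIdx s := by
  unfold lastWsIdx
  rw [PySem.List.enumerate_append, List.foldl_append]
  simp [PySem.List.enumerate_cons, PySem.List.enumerate_nil]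

theorem snapLoopA_eq (cs : List Char) (l m : Nat) (h : l + m ≤ cs.length) :
    snapLoopA cs m ((l + m : Nat) : Int) =
      (lastWsIdx ((cs.drop l).take m)).map (fun i => (l : Int) + i + 1) := by
  induction m with
  | zero =>
      rw [snapLoopA]
      simp [lastWsIdx, PySem.List.enumerate_nil]
  | succ m ih =>
      have hlt : l + m < cs.length := by omega
      rw [snapLoopA]
      have hidx : ((l + (m + 1) : Nat) : Int) - 1 = ((l + m : Nat) : Int) := by push_cast; ring
      rw [hidx, PySem.List.pyGetD_natCast]
      have hdl : m < (cs.drop l).length := by rw [List.length_drop]; omega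
      have htake : (cs.drop l).take (m + 1) = (cs.drop l).take m ++ [(cs.drop l)[m]] := by
        rw [List.take_add_one]
        simp [List.getElem?_eq_getElem hdl]
      rw [htake, lastWsIdx_append_singleton]
      have hget : (cs.drop l)[m] = cs[l + m] := by
        simp [List.getElem_drop]
      have hgetD : cs.getD (l + m) 'x' = cs[l + m] := List.getD_eq_getElem cs 'x' hlt
      rw [hgetD, ← hget]
      by_cases hsp : PySem.Chars.isspace (cs.drop l)[m]
      · rw [if_pos hsp, if_pos hsp]
        simp [List.length_take]
        omega
      · rw [if_neg hsp, if_neg hsp, ih (by omega)]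

theorem snap_to_whitespace_before_py_spec : Claim_equal_snap_to_whitespace_before_py := by
  intro lt pos window _
  unfold Spec_snap_to_whitespace_before_py
  simp only [snap_to_whitespace_before_py, snap_to_whitespace_before_py_alt, clamp_int_py]
  have hn0 : (0 : Int) ≤ (lt.length : Int) := by positivity
  have hp : (if pos < 0 then 0 else if pos > (lt.length : Int) then (lt.length : Int) else pos)
      = max 0 (min (lt.length : Int) pos) := by split_ifs <;> omega
  rw [hp]
  have hp0' : 0 ≤ max 0 (min (lt.length : Int) pos) := le_max_left _ _
  have hpn' : max 0 (min (lt.length : Int) pos) ≤ (lt.length : Int) := by omega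
  generalize hP : max 0 (min (lt.length : Int) pos) = p at hp0' hpn' ⊢
  have hl0 : 0 ≤ max 0 (p - window) := le_max_left _ _
  generalize hL : max 0 (p - window) = l at hl0 ⊢
  have hLL : (lt.toList.length : Int) = (lt.length : Int) := by simp
  have hslice : (PySem.Str.slice lt (some l) (some p)).toList
      = (lt.toList.drop l.toNat).take (p.toNat - l.toNat) := by
    rw [PySem.Str.toList_slice, PySem.Chars.slice_eq_listSlice,
        PySem.List.slice_toNat _ hl0 hp0']
  rw [hslice]
  by_cases hlp : l ≤ p
  · generalize ha : l.toNat = a at hslice ⊢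
    have hm' : (p - l).toNat = p.toNat - a := by omega
    rw [hm']
    generalize hm : p.toNat - a = m at hslice ⊢
    have hl' : l = ((a : Nat) : Int) := by omega
    have hpeq : p = ((a + m : Nat) : Int) := by omega
    have hlen : a + m ≤ lt.toList.length := by omega
    rw [hl', hpeq, snapLoopA_eq lt.toList a m hlen]
    cases lastWsIdx ((lt.toList.drop a).take m) with
    | none => simp
    | some i => simp
  · have h0 : (p - l).toNat = 0 := by omega
    have h0' : p.toNat - l.toNat = 0 := by omega
    rw [h0, h0']
    simp [snapLoopA, lastWsIdx, PySem.List.enumerate_nil]
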